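-- pv_equiv track=rewrite | github.com/stebranchi/ReinforcementLearningPrescriptivePM | src/timeline_replayer/Timeline_train_tmp.py | add_sepsis_pos_decl_reward
-- ===== SOURCE A (Python) =====
-- def add_sepsis_pos_decl_reward(path, return_dict, declare_reward):
-- 	extra_reward = 0
-- 	once = [True, True, True, True, True]
-- 	for index, state in list(enumerate(path))[:-1]:
-- 		# unitary rewards
-- 		if 'ER Registration' in state and once[0]:
-- 			extra_reward += declare_reward
-- 			once[0] = False
-- 		if 'ER Triage' in state and once[1]:
-- 			extra_reward += declare_reward
-- 			once[1] = False
-- 		if 'ER Sepsis Triage' in state and once[2]: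
-- 			extra_reward += declare_reward
-- 			once[2] = False
-- 		# binary reward
-- 		if 'ER Registration' in state and 'ER Triage' in path[index+1] and once[3]:
-- 			extra_reward += declare_reward
-- 			once[3] = False
-- 		if 'ER Triage' in state and 'ER Sepsis Triage' in path[index+1] and once[4]:
-- 			extra_reward += declare_reward
-- 			once[4] = False
-- 	return_dict = {k: v + extra_reward for k, v in return_dict.items()}
--
-- 	return return_dict
-- ===== SOURCE B (Python) =====
-- def add_sepsis_pos_decl_reward(path, return_dict, declare_reward):
--     body = path[:-1]
--     b0 = any('ER Registration' in s for s in body)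
--     b1 = any('ER Triage' in s for s in body)
--     b2 = any('ER Sepsis Triage' in s for s in body)
--     b3 = any('ER Registration' in a and 'ER Triage' in b for a, b in zip(path, path[1:]))
--     b4 = any('ER Triage' in a and 'ER Sepsis Triage' in b for a, b in zip(path, path[1:]))
--     extra = 0
--     for b in (b0, b1, b2, b3, b4):
--         if b:
--             extra += declare_reward
--     return {k: v + extra for k, v in return_dict.items()}
-- ===== Notes on version B (the rewrite author's own statement) =====
-- stated objective: simpler
-- what changed: Replaces the stateful loop with five mutable once-flags by five declarative any() scans (unitary ones over path[:-1], binary ones over zip(path, path[1:])) and one accumulation pass over the five booleans.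
import Mathlib
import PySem

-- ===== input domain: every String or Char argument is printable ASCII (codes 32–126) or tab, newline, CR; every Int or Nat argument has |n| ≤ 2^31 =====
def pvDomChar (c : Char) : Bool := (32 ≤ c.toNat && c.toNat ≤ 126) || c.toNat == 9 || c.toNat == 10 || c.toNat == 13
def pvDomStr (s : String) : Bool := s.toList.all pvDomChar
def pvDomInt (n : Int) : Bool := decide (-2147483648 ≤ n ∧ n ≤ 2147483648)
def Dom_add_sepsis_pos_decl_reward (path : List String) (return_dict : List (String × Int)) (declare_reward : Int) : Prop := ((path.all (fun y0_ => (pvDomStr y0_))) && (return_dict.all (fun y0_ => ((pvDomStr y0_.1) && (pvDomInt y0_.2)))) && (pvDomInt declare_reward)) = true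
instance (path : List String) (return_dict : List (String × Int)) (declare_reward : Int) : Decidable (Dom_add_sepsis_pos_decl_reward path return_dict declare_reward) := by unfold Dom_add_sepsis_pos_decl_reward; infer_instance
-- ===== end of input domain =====

-- B replaces A's stateful once-flag loop by five declarative any() scans; objective: simpler.

-- ===== PORT A =====
-- the body of A's for-loop: state st = (extra_reward, once[0..4]), item is = (index, state)
def addSepsisBodyA (path : List String) (declare_reward : Int)
    (st : Int × Bool × Bool × Bool × Bool × Bool) (is : Int × String) :
    Int × Bool × Bool × Bool × Bool × Bool :=
  let index := is.1
  let state := is.2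
  let extra := st.1
  let o0 := st.2.1; let o1 := st.2.2.1; let o2 := st.2.2.2.1
  let o3 := st.2.2.2.2.1; let o4 := st.2.2.2.2.2
  -- path[index+1]; index+1 is always in range inside this loop, so pyGet? is always some
  let nxt := (PySem.List.pyGet? path (index + 1)).getD ""
  let extra := if PySem.Str.isIn "ER Registration" state && o0 then extra + declare_reward else extra
  let o0 := if PySem.Str.isIn "ER Registration" state && o0 then false else o0
  let extra := if PySem.Str.isIn "ER Triage" state && o1 then extra + declare_reward else extra
  let o1 := if PySem.Str.isIn "ER Triage" state && o1 then false else o1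
  let extra := if PySem.Str.isIn "ER Sepsis Triage" state && o2 then extra + declare_reward else extra
  let o2 := if PySem.Str.isIn "ER Sepsis Triage" state && o2 then false else o2
  let extra := if PySem.Str.isIn "ER Registration" state && PySem.Str.isIn "ER Triage" nxt && o3 then extra + declare_reward else extra
  let o3 := if PySem.Str.isIn "ER Registration" state && PySem.Str.isIn "ER Triage" nxt && o3 then false else o3
  let extra := if PySem.Str.isIn "ER Triage" state && PySem.Str.isIn "ER Sepsis Triage" nxt && o4 then extra + declare_reward else extra
  let o4 := if PySem.Str.isIn "ER Triage" state && PySem.Str.isIn "ER Sepsis Triage" nxt && o4 then false else o4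
  (extra, o0, o1, o2, o3, o4)

def add_sepsis_pos_decl_reward (path : List String) (return_dict : List (String × Int)) (declare_reward : Int) : List (String × Int) :=
  -- extra_reward = 0; once = [True]*5; for index, state in list(enumerate(path))[:-1]: …
  let st :=
    (PySem.List.slice (PySem.List.enumerate path) none (some (-1))).foldl
      (addSepsisBodyA path declare_reward) (0, true, true, true, true, true)
  let extra_reward := st.1
  -- return {k: v + extra_reward for k, v in return_dict.items()}
  (((PySem.Dict.ofList return_dict).items.foldl
      (fun (d : PySem.Dict String Int) kv => d.insert kv.1 (kv.2 + extra_reward))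
      PySem.Dict.empty)).items

-- ===== PORT B =====
def add_sepsis_pos_decl_reward_alt (path : List String) (return_dict : List (String × Int)) (declare_reward : Int) : List (String × Int) :=
  let body := PySem.List.slice path none (some (-1))
  let b0 := body.any (fun s => PySem.Str.isIn "ER Registration" s)
  let b1 := body.any (fun s => PySem.Str.isIn "ER Triage" s)
  let b2 := body.any (fun s => PySem.Str.isIn "ER Sepsis Triage" s)
  let pairs := path.zip (PySem.List.slice path (some 1) none)
  let b3 := pairs.any (fun p => PySem.Str.isIn "ER Registration" p.1 && PySem.Str.isIn "ER Triage" p.2)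
  let b4 := pairs.any (fun p => PySem.Str.isIn "ER Triage" p.1 && PySem.Str.isIn "ER Sepsis Triage" p.2)
  let extra := [b0, b1, b2, b3, b4].foldl (fun acc b => if b then acc + declare_reward else acc) 0
  (((PySem.Dict.ofList return_dict).items.foldl
      (fun (d : PySem.Dict String Int) kv => d.insert kv.1 (kv.2 + extra))
      PySem.Dict.empty)).items

-- ===== PRECONDITION & SPEC =====
def Spec_add_sepsis_pos_decl_reward (path : List String) (return_dict : List (String × Int)) (declare_reward : Int) (out : List (String × Int)) : Prop := out = add_sepsis_pos_decl_reward_alt path return_dict declare_reward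
instance (path : List String) (return_dict : List (String × Int)) (declare_reward : Int) (out : List (String × Int)) : Decidable (Spec_add_sepsis_pos_decl_reward path return_dict declare_reward out) := by unfold Spec_add_sepsis_pos_decl_reward; infer_instance

-- ===== CLAIM (what is proved, stated in full; the proofs are below) =====
def Claim_equal_add_sepsis_pos_decl_reward : Prop := ∀ (path : List String) (return_dict : List (String × Int)) (declare_reward : Int), Dom_add_sepsis_pos_decl_reward path return_dict declare_reward → Spec_add_sepsis_pos_decl_reward path return_dict declare_reward (add_sepsis_pos_decl_reward path return_dict declare_reward)

-- ===== LEMMAS AND PROOFS =====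

-- proof-side version of A's loop body that takes (state, path[index+1]) directly, in unpacked form
def stepP (dr : Int) (st : Int × Bool × Bool × Bool × Bool × Bool)
    (p : String × String) : Int × Bool × Bool × Bool × Bool × Bool :=
  match st with
  | (extra, o0, o1, o2, o3, o4) =>
  let extra := if PySem.Str.isIn "ER Registration" p.1 && o0 then extra + dr else extra
  let o0 := if PySem.Str.isIn "ER Registration" p.1 && o0 then false else o0
  let extra := if PySem.Str.isIn "ER Triage" p.1 && o1 then extra + dr else extra
  let o1 := if PySem.Str.isIn "ER Triage" p.1 && o1 then false else o1
  let extra := if PySem.Str.isIn "ER Sepsis Triage" p.1 && o2 then extra + dr else extra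
  let o2 := if PySem.Str.isIn "ER Sepsis Triage" p.1 && o2 then false else o2
  let extra := if PySem.Str.isIn "ER Registration" p.1 && PySem.Str.isIn "ER Triage" p.2 && o3 then extra + dr else extra
  let o3 := if PySem.Str.isIn "ER Registration" p.1 && PySem.Str.isIn "ER Triage" p.2 && o3 then false else o3
  let extra := if PySem.Str.isIn "ER Triage" p.1 && PySem.Str.isIn "ER Sepsis Triage" p.2 && o4 then extra + dr else extra
  let o4 := if PySem.Str.isIn "ER Triage" p.1 && PySem.Str.isIn "ER Sepsis Triage" p.2 && o4 then false else o4
  (extra, o0, o1, o2, o3, o4)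

lemma enum_dropLast {α : Type} (xs : List α) : ∀ s : Int,
    (PySem.List.enumerate xs s).dropLast = PySem.List.enumerate xs.dropLast s := by
  induction xs with
  | nil => intro s; simp [PySem.List.enumerate_nil]
  | cons x xs ih =>
    intro s
    cases xs with
    | nil => simp [PySem.List.enumerate_cons, PySem.List.enumerate_nil]
    | cons y ys =>
      simp only [PySem.List.enumerate_cons, List.dropLast_cons₂]
      rw [← PySem.List.enumerate_cons y ys (s + 1), ih (s + 1)]

lemma zip_tail_map_fst {α : Type} (xs : List α) :
    (xs.zip xs.tail).map Prod.fst = xs.dropLast := by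
  induction xs with
  | nil => simp
  | cons x xs ih =>
    cases xs with
    | nil => simp
    | cons y ys => simpa using ih

lemma foldA_eq (declare_reward : Int) (path : List String) :
    ∀ (ys : List String) (j : ℕ) (st : Int × Bool × Bool × Bool × Bool × Bool),
      ys = path.drop j →
      (PySem.List.enumerate ys.dropLast (j : Int)).foldl (addSepsisBodyA path declare_reward) st
        = (ys.zip ys.tail).foldl (stepP declare_reward) st := by
  intro ys
  induction ys with
  | nil => intro j st _; simp [PySem.List.enumerate_nil]
  | cons y ys ih =>
    intro j st hy
    cases ys with
    | nil => simp [PySem.List.enumerate_nil]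
    | cons z ys' =>
      have hz : PySem.List.pyGet? path ((j : Int) + 1) = some z := by
        have h1 : path[j + 1]? = some z := by
          have : (path.drop j)[1]? = some z := by rw [← hy]; rfl
          simpa [List.getElem?_drop] using this
        have : ((j : Int) + 1) = ((j + 1 : ℕ) : Int) := by push_cast; ring
        rw [this, PySem.List.pyGet?_natCast, h1]
      have hbody : addSepsisBodyA path declare_reward st ((j : Int), y)
          = stepP declare_reward st (y, z) := by
        obtain ⟨e0, q0, q1, q2, q3, q4⟩ := st
        dsimp only [addSepsisBodyA, stepP]
        rw [hz]
        rfl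
      have hdrop : z :: ys' = path.drop (j + 1) := by
        have := congrArg List.tail hy
        simpa [List.tail_drop] using this
      simp only [List.dropLast_cons₂, PySem.List.enumerate_cons, List.foldl_cons, hbody]
      have := ih (j + 1) (stepP declare_reward st (y, z)) hdrop
      push_cast at this ⊢
      rw [this]
      simp [List.zip, List.tail]

lemma cellstep (o : Bool) (f : String × String → Bool) (a : String × String)
    (l : List (String × String)) (dr : Int) :
    (if f a && o then dr else 0)
      + (if (if f a && o then false else o) && l.any f then dr else 0)
      = if o && (a :: l).any f then dr else 0 := by
  simp only [List.any_cons]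
  rcases Bool.eq_false_or_eq_true (f a) with h1 | h1 <;>
    rcases Bool.eq_false_or_eq_true (l.any f) with h2 | h2 <;>
      cases o <;> simp [h1, h2]

lemma cellstep3 (o c d : Bool) (f : String × String → Bool) (a : String × String)
    (l : List (String × String)) (dr : Int) (hfa : f a = (c && d)) :
    (if c && d && o then dr else 0)
      + (if (if c && d && o then false else o) && l.any f then dr else 0)
      = if o && (a :: l).any f then dr else 0 := by
  simp only [List.any_cons, hfa]
  rcases Bool.eq_false_or_eq_true (l.any f) with h2 | h2 <;>
    cases o <;> cases c <;> cases d <;> simp [h2]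

lemma ite_add_split (c : Prop) [Decidable c] (x dr : Int) :
    (if c then x + dr else x) = x + (if c then dr else 0) := by
  split_ifs <;> simp

lemma loopP_spec (dr : Int) :
    ∀ (l : List (String × String)) (e : Int) (o0 o1 o2 o3 o4 : Bool),
      (l.foldl (stepP dr) (e, o0, o1, o2, o3, o4)).1
        = e + (if o0 && l.any (fun p => PySem.Str.isIn "ER Registration" p.1) then dr else 0)
            + (if o1 && l.any (fun p => PySem.Str.isIn "ER Triage" p.1) then dr else 0)
            + (if o2 && l.any (fun p => PySem.Str.isIn "ER Sepsis Triage" p.1) then dr else 0)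
            + (if o3 && l.any (fun p => PySem.Str.isIn "ER Registration" p.1 && PySem.Str.isIn "ER Triage" p.2) then dr else 0)
            + (if o4 && l.any (fun p => PySem.Str.isIn "ER Triage" p.1 && PySem.Str.isIn "ER Sepsis Triage" p.2) then dr else 0) := by
  intro l
  induction l with
  | nil => intro e o0 o1 o2 o3 o4; simp
  | cons p l ih =>
    intro e o0 o1 o2 o3 o4
    rw [List.foldl_cons]
    dsimp only [stepP]
    rw [ih]
    simp only [ite_add_split]
    have h0 := cellstep o0 (fun p => PySem.Str.isIn "ER Registration" p.1) p l dr
    have h1 := cellstep o1 (fun p => PySem.Str.isIn "ER Triage" p.1) p l dr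
    have h2 := cellstep o2 (fun p => PySem.Str.isIn "ER Sepsis Triage" p.1) p l dr
    have h3 := cellstep3 o3 (PySem.Str.isIn "ER Registration" p.1) (PySem.Str.isIn "ER Triage" p.2)
      (fun p => PySem.Str.isIn "ER Registration" p.1 && PySem.Str.isIn "ER Triage" p.2) p l dr rfl
    have h4 := cellstep3 o4 (PySem.Str.isIn "ER Triage" p.1) (PySem.Str.isIn "ER Sepsis Triage" p.2)
      (fun p => PySem.Str.isIn "ER Triage" p.1 && PySem.Str.isIn "ER Sepsis Triage" p.2) p l dr rfl
    linear_combination h0 + h1 + h2 + h3 + h4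

lemma extra_eq (path : List String) (declare_reward : Int) :
    ((PySem.List.slice (PySem.List.enumerate path) none (some (-1))).foldl
      (addSepsisBodyA path declare_reward) (0, true, true, true, true, true)).1
    = [((PySem.List.slice path none (some (-1))).any (fun s => PySem.Str.isIn "ER Registration" s)),
       ((PySem.List.slice path none (some (-1))).any (fun s => PySem.Str.isIn "ER Triage" s)),
       ((PySem.List.slice path none (some (-1))).any (fun s => PySem.Str.isIn "ER Sepsis Triage" s)),
       ((path.zip (PySem.List.slice path (some 1) none)).any (fun p => PySem.Str.isIn "ER Registration" p.1 && PySem.Str.isIn "ER Triage" p.2)),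
       ((path.zip (PySem.List.slice path (some 1) none)).any (fun p => PySem.Str.isIn "ER Triage" p.1 && PySem.Str.isIn "ER Sepsis Triage" p.2))].foldl
        (fun acc b => if b then acc + declare_reward else acc) 0 := by
  rw [PySem.List.slice_to_neg_one, PySem.List.slice_to_neg_one, PySem.List.slice_from_one,
      enum_dropLast]
  have h := foldA_eq declare_reward path path 0 (0, true, true, true, true, true) (by simp)
  rw [Nat.cast_zero] at h
  rw [h, loopP_spec]
  have hmap : ∀ f : String → Bool,
      path.dropLast.any f = (path.zip path.tail).any (fun p => f p.1) := by
    intro f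
    rw [← zip_tail_map_fst path, List.any_map]
    rfl
  simp only [List.foldl_cons, List.foldl_nil, hmap]
  simp only [ite_add_split, Bool.true_and]

theorem add_sepsis_pos_decl_reward_spec : Claim_equal_add_sepsis_pos_decl_reward := by
  intro path return_dict declare_reward _
  show _ = _
  simp only [add_sepsis_pos_decl_reward, add_sepsis_pos_decl_reward_alt]
  rw [extra_eq]
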